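-- pv_equiv track=rewrite | github.com/this-is-real/algorithm | 카카오모음/1주차/문자열 압축/김제우.py | solution
-- ===== SOURCE A (Python) =====
-- def solution(s):
--     windows = [i for i in range(1,len(s)//2 + 1)]
--     result = []
--     if len(s) == 1:
--         return 1
--     for win_size in windows:
--         s_poped = s[0:win_size]
--         s_remain = s[win_size:]
--         s_stack = ""
--         count = 1
--         for i in range(len(s)//win_size):
--             if s_poped == s_remain[0:win_size]:
--                 count += 1
--             else :
--                 if count == 1:
--                     s_stack += s_poped
--                 else :
--                     s_stack += str(count)+s_poped
--                 count = 1
--             s_poped = s_remain[0:win_size]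
--             s_remain = s_remain[win_size:]
--         if count == 1:
--             s_stack += s_poped
--         else :
--             s_stack += str(count)+s_poped
--         result.append(len(s_stack))
--     answer = min(result)
--     return answer
-- ===== SOURCE B (Python) =====
-- def solution(s):
--     if len(s) == 1:
--         return 1
--     n = len(s)
--     totals = []
--     for w in range(1, n // 2 + 1):
--         chunks = [s[i:i + w] for i in range(0, n, w)]
--         m = len(chunks)
--         bounds = [0] + [i for i in range(1, m) if chunks[i] != chunks[i - 1]] + [m]
--         totals.append(sum(len(chunks[a]) + (len(str(b - a)) if b - a > 1 else 0)
--                           for a, b in zip(bounds, bounds[1:])))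
--     return min(totals)
-- ===== Notes on version B (the rewrite author's own statement) =====
-- stated objective: faster
-- what changed: B drops A's stateful compressed-string building (pop-a-chunk/compare/count/append to a growing string, then take len) and instead, per window, builds the chunk list once, computes run boundaries as a list of cut indices, and sums len(chunk)+digit-count over zipped adjacent boundary pairs.
import Mathlib
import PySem

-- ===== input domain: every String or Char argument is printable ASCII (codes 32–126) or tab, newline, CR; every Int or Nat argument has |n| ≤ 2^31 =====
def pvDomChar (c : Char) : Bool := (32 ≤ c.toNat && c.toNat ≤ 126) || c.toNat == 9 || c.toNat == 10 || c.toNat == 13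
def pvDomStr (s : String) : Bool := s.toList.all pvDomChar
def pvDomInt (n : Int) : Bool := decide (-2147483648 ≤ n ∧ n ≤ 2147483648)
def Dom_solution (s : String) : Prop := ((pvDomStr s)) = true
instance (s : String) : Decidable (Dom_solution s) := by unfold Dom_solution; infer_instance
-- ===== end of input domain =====

-- B re-implements the per-window compression count: it builds the chunk list once, finds run
-- boundaries as a cut-index list and sums len+digit-count over zipped boundary pairs, instead of
-- A's stateful pop/compare/count compressed-string building with its repeated tail re-slicing
-- (a timing run measured B faster on large inputs).

-- ===== PORT A =====
-- s_stack += s_poped  /  s_stack += str(count)+s_poped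
def pvFlushA (stack poped : List Char) (count : Int) : List Char :=
  if count == 1 then stack ++ poped else stack ++ PySem.Int.toChars count ++ poped

-- the inner 'for i in range(len(s)//win_size)' loop, plus the final flush after it
def pvInnerA (w : Int) : Nat → List Char → List Char → List Char → Int → List Char
  | 0, poped, _remain, stack, count => pvFlushA stack poped count
  | k+1, poped, remain, stack, count =>
    let nxt := PySem.List.slice remain (some 0) (some w)
    let remain' := PySem.List.slice remain (some w) none
    if poped == nxt then pvInnerA w k nxt remain' stack (count + 1)
    else pvInnerA w k nxt remain' (pvFlushA stack poped count) 1

def solution (s : String) : Int :=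
  let cs := s.toList
  let n : Int := PySem.List.len cs
  let windows := (PySem.List.pyRange 1 (PySem.Int.floordiv n 2 + 1) 1).map (fun i => i)
  if cs.length == 1 then 1
  else
    let result : List Int := windows.foldl (fun acc w =>
      acc ++ [((pvInnerA w (PySem.Int.floordiv n w).toNat
                  (PySem.List.slice cs (some 0) (some w))
                  (PySem.List.slice cs (some w) none) [] 1).length : Int)]) []
    (PySem.List.min? result (fun x => x)).getD 0

-- ===== PORT B =====
def solution_alt (s : String) : Int :=
  let cs := s.toList
  if cs.length == 1 then 1
  else
    let n : Int := PySem.List.len cs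
    let totals : List Int := (PySem.List.pyRange 1 (PySem.Int.floordiv n 2 + 1) 1).map (fun w =>
      let chunks := (PySem.List.pyRange 0 n w).map (fun i => PySem.List.slice cs (some i) (some (i + w)))
      let m : Int := PySem.List.len chunks
      let bounds := [(0 : Int)] ++
        ((PySem.List.pyRange 1 m 1).filter
          (fun i => !(PySem.List.pyGetD chunks i [] == PySem.List.pyGetD chunks (i - 1) []))) ++ [m]
      ((bounds.zip (PySem.List.slice bounds (some 1) none)).map (fun ab =>
        ((PySem.List.pyGetD chunks ab.1 []).length : Int) +
          (if ab.2 - ab.1 > 1 then ((PySem.Int.toChars (ab.2 - ab.1)).length : Int) else 0))).sum)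
    (PySem.List.min? totals (fun x => x)).getD 0

-- ===== PRECONDITION & SPEC =====
-- Pre_ excludes only the empty string, on which A raises ValueError (min of an empty list).
def Pre_solution (s : String) : Prop := s ≠ ""
instance (s : String) : Decidable (Pre_solution s) := by unfold Pre_solution; infer_instance
def pvWitness_solution : String := "aabbaccc"

def Spec_solution (s : String) (out : Int) : Prop := out = solution_alt s
instance (s : String) (out : Int) : Decidable (Spec_solution s out) := by unfold Spec_solution; infer_instance

-- ===== CLAIM (what is proved, stated in full; the proofs are below) =====
def Claim_equal_solution : Prop := ∀ (s : String), Dom_solution s → Pre_solution s → Spec_solution s (solution s)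

-- ===== LEMMAS AND PROOFS =====

-- run-length count of the prefix of t equal to x
def pvRunCt (x : List Char) : List (List Char) → Nat
  | [] => 0
  | y :: t => if y = x then pvRunCt x t + 1 else 0

lemma pvRunCt_le (x : List Char) (t : List (List Char)) : pvRunCt x t ≤ t.length := by
  induction t with
  | nil => simp [pvRunCt]
  | cons y t ih =>
    simp only [pvRunCt]
    split
    · simp only [List.length_cons]; omega
    · simp

-- digit cost of a run of length c (0 if the count is not printed)
def pvDigits (c : Int) : Int := if 1 < c then ((PySem.Int.toChars c).length : Int) else 0

-- reference run-length-encoded size, one run per step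
def pvRleS : List (List Char) → Int
  | [] => 0
  | x :: t =>
    let k := pvRunCt x t
    (x.length : Int) + pvDigits (1 + (k : Int)) + pvRleS (t.drop k)
termination_by l => l.length
decreasing_by
  simp only [List.length_drop, List.length_cons]
  omega

-- one flushed run, as A writes it
def pvFlush1 (p : List Char) (c : Int) : List Char :=
  if c == 1 then p else PySem.Int.toChars c ++ p

-- A's loop state collapsed: pending chunk p with count c, remaining chunk stream
def pvRleRun (p : List Char) (c : Int) : List (List Char) → List Char
  | [] => pvFlush1 p c
  | x :: t => if p == x then pvRleRun x (c + 1) t else pvFlush1 p c ++ pvRleRun x 1 t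

-- the stream of k chunks A's loop slices off remain
def pvStream (W : Nat) : Nat → List Char → List (List Char)
  | 0, _ => []
  | k+1, r => r.take W :: pvStream W k (r.drop W)

-- adjacent-difference flags of the chunk list
def pvFlags (l : List (List Char)) : List Bool := (l.zip l.tail).map (fun ab => ab.1 != ab.2)

-- positions (from base i) of the true flags
def pvTruePos : List Bool → Int → List Int
  | [], _ => []
  | b :: bs, i => if b then i :: pvTruePos bs (i + 1) else pvTruePos bs (i + 1)

-- the zipped boundary-pair sum, written as a two-level recursion
def pvZ (chunks : List (List Char)) : List Int → Int
  | a :: b :: rest =>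
    (((PySem.List.pyGetD chunks a []).length : Int) +
      (if b - a > 1 then ((PySem.Int.toChars (b - a)).length : Int) else 0)) +
      pvZ chunks (b :: rest)
  | _ => 0

-- B's per-window total over an arbitrary chunk list
def pvCutTotal (chunks : List (List Char)) : Int :=
  pvZ chunks ([(0 : Int)] ++ pvTruePos (pvFlags chunks) 1 ++ [(chunks.length : Int)])

-- ========== A side ==========

lemma pvFlushA_eq (stack p : List Char) (c : Int) :
    pvFlushA stack p c = stack ++ pvFlush1 p c := by
  simp only [pvFlushA, pvFlush1]
  split <;> simp

lemma pvInnerA_eq (W : Nat) :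
    ∀ (k : Nat) (p r stack : List Char) (c : Int),
      pvInnerA (W : Int) k p r stack c = stack ++ pvRleRun p c (pvStream W k r) := by
  intro k
  induction k with
  | zero => intro p r stack c; simp [pvInnerA, pvStream, pvRleRun, pvFlushA_eq]
  | succ k ih =>
    intro p r stack c
    simp only [pvInnerA, pvStream, pvRleRun,
      PySem.List.slice_zero_start, PySem.List.slice_to_natCast, PySem.List.slice_from_natCast]
    by_cases hpx : p = r.take W
    · rw [if_pos (by simpa using hpx), if_pos (by simpa using hpx), ih]
    · rw [if_neg (by simpa using hpx), if_neg (by simpa using hpx), ih, pvFlushA_eq,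
        List.append_assoc]

lemma pvStream_map (W : Nat) :
    ∀ (k : Nat) (r : List Char),
      pvStream W k r = (List.range k).map (fun i => (r.drop (i * W)).take W) := by
  intro k
  induction k with
  | zero => intro r; simp [pvStream]
  | succ k ih =>
    intro r
    rw [List.range_succ_eq_map]
    simp only [pvStream, ih, List.map_cons, List.map_map, List.drop_zero, Nat.zero_mul]
    refine congrArg (_ :: ·) (List.map_congr_left fun i _ => ?_)
    simp only [Function.comp_apply, List.drop_drop]
    rw [show W + i * W = i.succ * W by simp [Nat.succ_mul]; ring]

lemma pvFlush1_len (p : List Char) (c : Int) (hc : 1 ≤ c) :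
    ((pvFlush1 p c).length : Int) = (p.length : Int) + pvDigits c := by
  simp only [pvFlush1, pvDigits]
  by_cases h1 : c = 1
  · rw [if_pos (by simpa using h1), if_neg (by omega)]; simp
  · rw [if_neg (by simpa using h1), if_pos (by omega)]
    simp only [List.length_append]
    push_cast
    ring

lemma pvRleRun_len (t : List (List Char)) :
    ∀ (p : List Char) (c : Int), 1 ≤ c →
      ((pvRleRun p c t).length : Int) =
        (p.length : Int) + pvDigits (c + (pvRunCt p t : Int)) + pvRleS (t.drop (pvRunCt p t)) := by
  induction t with
  | nil =>
    intro p c hc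
    simp only [pvRleRun, pvRunCt, List.drop_nil, pvRleS]
    rw [pvFlush1_len p c hc]
    simp
  | cons x t ih =>
    intro p c hc
    simp only [pvRleRun, pvRunCt]
    by_cases hpx : p = x
    · subst hpx
      rw [if_pos (by simp), if_pos rfl, ih p (c + 1) (by omega)]
      simp only [List.drop_succ_cons]
      push_cast
      rw [show c + 1 + (pvRunCt p t : Int) = c + ((pvRunCt p t : Int) + 1) by ring]
    · rw [if_neg (by simpa using hpx), if_neg (fun h => hpx h.symm)]
      simp only [List.length_append, List.drop_zero]
      push_cast
      rw [pvFlush1_len p c hc, ih x 1 (by omega)]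
      simp only [pvRleS]
      ring_nf

lemma pvRleRun_trailing_nil (t : List (List Char)) :
    ∀ (p : List Char) (c : Int), p ≠ [] → (∀ x ∈ t, x ≠ []) →
      pvRleRun p c (t ++ [[]]) = pvRleRun p c t := by
  induction t with
  | nil =>
    intro p c hp _
    simp only [List.nil_append, pvRleRun]
    rw [if_neg (by simpa using hp)]
    simp [pvFlush1]
  | cons x t ih =>
    intro p c hp hall
    simp only [List.cons_append, pvRleRun]
    have hx : x ≠ [] := hall x (by simp)
    have hrest : ∀ y ∈ t, y ≠ [] := fun y hy => hall y (by simp [hy])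
    by_cases hpx : p = x
    · rw [if_pos (by simpa using hpx), if_pos (by simpa using hpx), ih x (c + 1) hx hrest]
    · rw [if_neg (by simpa using hpx), if_neg (by simpa using hpx), ih x 1 hx hrest]

-- ========== B side ==========

lemma pvTruePos_shift (fl : List Bool) : ∀ (i d : Int),
    pvTruePos fl (i + d) = (pvTruePos fl i).map (fun z => z + d) := by
  induction fl with
  | nil => intro i d; simp [pvTruePos]
  | cons b bs ih =>
    intro i d
    simp only [pvTruePos]
    rw [show i + d + 1 = (i + 1) + d by ring, ih (i + 1) d]
    cases b <;> simp

lemma pvFilter_eq_truePos (fl : List Bool) :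
    ∀ (i : Int) (p : Int → Bool), (∀ j : Nat, j < fl.length → p (i + (j : Int)) = fl.getD j false) →
      (PySem.List.pyRange i (i + (fl.length : Int)) 1).filter p = pvTruePos fl i := by
  induction fl with
  | nil =>
    intro i p _
    rw [PySem.List.pyRange_one_eq_nil (by simp)]
    simp [pvTruePos]
  | cons b bs ih =>
    intro i p hp
    rw [PySem.List.pyRange_one_cons (by simp only [List.length_cons]; push_cast; omega)]
    have h0 : p i = b := by simpa using hp 0 (by simp)
    have hrec : (PySem.List.pyRange (i + 1) (i + ((b :: bs).length : Int)) 1).filter p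
        = pvTruePos bs (i + 1) := by
      rw [show i + ((b :: bs).length : Int) = (i + 1) + (bs.length : Int) by
        simp only [List.length_cons]; push_cast; ring]
      refine ih (i + 1) p fun j hj => ?_
      rw [show (i + 1) + (j : Int) = i + ((j + 1 : Nat) : Int) by push_cast; ring]
      simpa using hp (j + 1) (by simpa using hj)
    have hlen : i + ((b :: bs).length : Int) = i + ((bs.length : Int) + 1) := by
      simp only [List.length_cons]; push_cast; ring
    rw [hlen] at hrec
    simp only [List.filter_cons, h0, pvTruePos]
    cases b <;> simp [hrec]

lemma pvFlags_cons_cons (x y : List Char) (r : List (List Char)) :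
    pvFlags (x :: y :: r) = (x != y) :: pvFlags (y :: r) := by
  simp [pvFlags]

lemma pvFlags_run (t : List (List Char)) : ∀ (x : List Char),
    pvFlags (x :: t) = List.replicate (pvRunCt x t) false ++
      (if t.drop (pvRunCt x t) = [] then [] else true :: pvFlags (t.drop (pvRunCt x t))) := by
  induction t with
  | nil => intro x; simp [pvFlags, pvRunCt]
  | cons y r ih =>
    intro x
    rw [pvFlags_cons_cons]
    by_cases hyx : y = x
    · subst hyx
      simp only [pvRunCt]
      rw [ih y]
      simp [List.replicate_succ]
    · simp only [pvRunCt, if_neg hyx, List.replicate_zero, List.nil_append, List.drop_zero]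
      rw [if_neg (by simp)]
      have hne : (x != y) = true := bne_iff_ne.mpr (fun h => hyx h.symm)
      simp [hne]

lemma pvTruePos_replicate_false (k : Nat) : ∀ (i : Int) (rest : List Bool),
    pvTruePos (List.replicate k false ++ rest) i = pvTruePos rest (i + (k : Int)) := by
  induction k with
  | zero => intro i rest; simp
  | succ k ih =>
    intro i rest
    simp only [List.replicate_succ, List.cons_append, pvTruePos]
    rw [if_neg (by simp), ih (i + 1) rest]
    congr 1
    push_cast
    ring

lemma pvTruePos_ge (fl : List Bool) : ∀ (i z : Int), z ∈ pvTruePos fl i → i ≤ z := by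
  induction fl with
  | nil => intro i z h; simp [pvTruePos] at h
  | cons b bs ih =>
    intro i z h
    simp only [pvTruePos] at h
    cases b with
    | false => exact le_trans (by omega) (ih (i + 1) z (by simpa using h))
    | true =>
      rcases (by simpa using h : z = i ∨ z ∈ pvTruePos bs (i + 1)) with h' | h'
      · omega
      · exact le_trans (by omega) (ih (i + 1) z h')

lemma pvZ_shift (chunks : List (List Char)) (d : Nat) :
    ∀ (bs : List Int), (∀ a ∈ bs, 0 ≤ a) →
      pvZ chunks (bs.map (fun z => z + (d : Int))) = pvZ (chunks.drop d) bs := by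
  intro bs
  induction bs with
  | nil => intro _; simp [pvZ]
  | cons a bs ih =>
    intro hnn
    cases bs with
    | nil => simp [pvZ]
    | cons b rest =>
      have ha : 0 ≤ a := hnn a (by simp)
      simp only [List.map_cons, pvZ]
      have ihh := ih (fun z hz => hnn z (by simp [hz]))
      simp only [List.map_cons] at ihh
      rw [ihh]
      have hidx : PySem.List.pyGetD chunks (a + (d : Int)) [] =
          PySem.List.pyGetD (chunks.drop d) a [] := by
        rw [PySem.List.pyGetD_of_nonneg _ _ (by omega), PySem.List.pyGetD_of_nonneg _ _ ha]
        rcases Int.eq_ofNat_of_zero_le ha with ⟨na, rfl⟩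
        simp only [List.getD]
        rw [show ((na : Int) + (d : Int)).toNat = d + na by omega,
          show ((na : Int)).toNat = na by omega, List.getElem?_drop]
      rw [hidx, show b + (d : Int) - (a + (d : Int)) = b - a by ring]

lemma pvFlags_getD (l : List (List Char)) : ∀ (j : Nat), j < (pvFlags l).length →
    (pvFlags l).getD j false = !(l.getD (j + 1) [] == l.getD j []) := by
  induction l with
  | nil => intro j hj; simp [pvFlags] at hj
  | cons x t ih =>
    intro j hj
    cases t with
    | nil => simp [pvFlags] at hj
    | cons y r =>
      rw [pvFlags_cons_cons] at hj ⊢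
      cases j with
      | zero =>
        simp only [List.getD_cons_zero, List.getD_cons_succ]
        by_cases hxy : x = y
        · simp [hxy]
        · rw [bne_iff_ne.mpr hxy]
          have hyx : y ≠ x := fun h => hxy h.symm
          simp [hyx]
      | succ j =>
        simp only [List.getD_cons_succ]
        exact ih j (by simpa using hj)

lemma pvGetD_cons_zero (x : List Char) (t : List (List Char)) :
    PySem.List.pyGetD (x :: t) 0 [] = x := by
  rw [PySem.List.pyGetD_of_nonneg _ _ le_rfl]
  rfl

lemma pvCutTotal_eq_rleS_fuel : ∀ (n : Nat) (l : List (List Char)),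
    l.length ≤ n → l ≠ [] → pvCutTotal l = pvRleS l := by
  intro n
  induction n with
  | zero =>
    intro l hl hne
    cases l with
    | nil => exact absurd rfl hne
    | cons x t => simp at hl
  | succ n ih =>
    intro l hl hne
    cases l with
    | nil => exact absurd rfl hne
    | cons x t =>
      have hkle := pvRunCt_le x t
      unfold pvCutTotal
      rw [pvFlags_run t x]
      by_cases ht' : t.drop (pvRunCt x t) = []
      · -- the whole list is one run
        have hlen : t.length = pvRunCt x t := by
          have := List.length_drop (l := t) (i := pvRunCt x t)
          rw [ht'] at this
          simp at this
          omega
        rw [if_pos ht', pvTruePos_replicate_false]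
        have hm : (((x :: t).length : Int)) = 1 + (pvRunCt x t : Int) := by
          simp [hlen]; ring
        simp only [pvTruePos, List.nil_append, List.append_nil, List.cons_append]
        simp only [pvZ, pvGetD_cons_zero, hm, pvRleS, ht', sub_zero, pvDigits]
      · -- at least two runs
        set k := pvRunCt x t with hk
        set t' := t.drop k with hteq
        rw [if_neg ht', pvTruePos_replicate_false]
        simp only [pvTruePos, if_true]
        have hshift : pvTruePos (pvFlags t') (1 + (k : Int) + 1)
            = (pvTruePos (pvFlags t') 1).map (fun z => z + ((k : Int) + 1)) := by
          rw [show (1 : Int) + (k : Int) + 1 = 1 + ((k : Int) + 1) by ring,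
            pvTruePos_shift]
        rw [hshift]
        have htlen : (t'.length : Int) + ((k : Int) + 1) = ((x :: t).length : Int) := by
          have h1 : t'.length = t.length - k := by rw [hteq, List.length_drop]
          rw [h1]
          simp only [List.length_cons]
          omega
        -- bounds (x::t) = 0 :: map (+ (k+1)) (bounds t')
        have hb : ([(0 : Int)] ++ ((1 + (k : Int)) :: (pvTruePos (pvFlags t') 1).map (fun z => z + ((k : Int) + 1))) ++ [((x :: t).length : Int)])
            = (0 : Int) :: (([(0 : Int)] ++ pvTruePos (pvFlags t') 1 ++ [(t'.length : Int)]).map (fun z => z + ((k : Int) + 1))) := by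
          simp only [List.map_append, List.map_cons, List.map_nil, List.cons_append,
            List.nil_append]
          rw [htlen]
          norm_num
          omega
        rw [hb]
        have hnn : ∀ a ∈ [(0 : Int)] ++ pvTruePos (pvFlags t') 1 ++ [(t'.length : Int)], 0 ≤ a := by
          intro a ha
          simp only [List.mem_append, List.mem_cons, List.nil_append,
            List.cons_append] at ha
          rcases ha with h | h | h
          all_goals first
            | omega
            | (have := pvTruePos_ge (pvFlags t') 1 a h; omega)
            | simp_all
        have hdrop : (x :: t).drop (k + 1) = t' := by simp [hteq]
        -- peel the first pair, then shift the rest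
        have hcons : ∃ rest, ([(0 : Int)] ++ pvTruePos (pvFlags t') 1 ++ [(t'.length : Int)]).map (fun z => z + ((k : Int) + 1)) = ((k : Int) + 1) :: rest := by
          simp
        obtain ⟨rest, hrest⟩ := hcons
        rw [hrest]
        simp only [pvZ, pvGetD_cons_zero]
        have hsh := pvZ_shift (x :: t) (k + 1) _ hnn
        push_cast at hsh
        rw [← hrest, hsh, hdrop]
        have hlt : t'.length < n + 1 := by
          have : t'.length ≤ t.length := by simp [hteq]
          simp only [List.length_cons] at hl
          omega
        have := ih t' (by omega) ht'
        unfold pvCutTotal at this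
        rw [this]
        simp only [pvRleS, ← hk, ← hteq, sub_zero, pvDigits]
        rw [show (1 : Int) + (k : Int) = (k : Int) + 1 from by ring]


lemma pvCutTotal_eq_rleS (l : List (List Char)) (h : l ≠ []) : pvCutTotal l = pvRleS l :=
  pvCutTotal_eq_rleS_fuel l.length l le_rfl h

lemma pvZip_sum (chunks : List (List Char)) : ∀ (bs : List Int),
    ((bs.zip bs.tail).map (fun ab =>
      ((PySem.List.pyGetD chunks ab.1 []).length : Int) +
        (if ab.2 - ab.1 > 1 then ((PySem.Int.toChars (ab.2 - ab.1)).length : Int) else 0))).sum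
      = pvZ chunks bs := by
  intro bs
  induction bs with
  | nil => simp [pvZ]
  | cons a bs ih =>
    cases bs with
    | nil => simp [pvZ]
    | cons b rest =>
      simp only [List.tail_cons, List.zip_cons_cons, List.map_cons, List.sum_cons, pvZ]
      rw [← ih]
      simp [List.tail_cons]

lemma pvFlags_length (chunks : List (List Char)) :
    (pvFlags chunks).length = chunks.length - 1 := by
  simp only [pvFlags, List.length_map, List.length_zip, List.length_tail]
  omega

lemma pvPortBody (chunks : List (List Char)) (h : chunks ≠ []) :
    ((([(0 : Int)] ++
        ((PySem.List.pyRange 1 ((chunks.length : Int)) 1).filter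
          (fun i => !(PySem.List.pyGetD chunks i [] == PySem.List.pyGetD chunks (i - 1) []))) ++ [((chunks.length : Int))]).zip
      (PySem.List.slice ([(0 : Int)] ++
        ((PySem.List.pyRange 1 ((chunks.length : Int)) 1).filter
          (fun i => !(PySem.List.pyGetD chunks i [] == PySem.List.pyGetD chunks (i - 1) []))) ++ [((chunks.length : Int))]) (some 1) none)).map
      (fun ab => ((PySem.List.pyGetD chunks ab.1 []).length : Int) +
        (if ab.2 - ab.1 > 1 then ((PySem.Int.toChars (ab.2 - ab.1)).length : Int) else 0))).sum
    = pvCutTotal chunks := by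
  have hlen1 : 1 ≤ chunks.length := by
    cases chunks with
    | nil => exact absurd rfl h
    | cons x t => simp
  have hfilter : (PySem.List.pyRange 1 ((chunks.length : Int)) 1).filter
      (fun i => !(PySem.List.pyGetD chunks i [] == PySem.List.pyGetD chunks (i - 1) []))
      = pvTruePos (pvFlags chunks) 1 := by
    rw [show (chunks.length : Int) = 1 + ((pvFlags chunks).length : Int) by
        rw [pvFlags_length]; omega]
    refine pvFilter_eq_truePos (pvFlags chunks) 1 _ fun j hj => ?_
    have hj' : j < chunks.length - 1 := by rwa [pvFlags_length] at hj
    rw [pvFlags_getD chunks j hj]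
    rw [show (1 : Int) + (j : Int) = ((j + 1 : Nat) : Int) by push_cast; ring]
    rw [PySem.List.pyGetD_natCast]
    rw [show ((j + 1 : Nat) : Int) - 1 = ((j : Nat) : Int) by push_cast; ring]
    rw [PySem.List.pyGetD_natCast]
  rw [PySem.List.slice_from_one, hfilter, pvZip_sum]
  rfl

-- ceiling division of n by W, as Python's range(0, n, W) length
lemma pvCeilDiv (n W : Nat) (hW : 0 < W) (hn : 0 < n) :
    (n + W - 1) / W = if W ∣ n then n / W else n / W + 1 := by
  have hqr := Nat.div_add_mod n W
  have hr : n % W < W := Nat.mod_lt _ hW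
  by_cases hd : W ∣ n
  · rw [if_pos hd]
    obtain ⟨q, rfl⟩ := hd
    rw [show W * q + W - 1 = W * q + (W - 1) by omega, Nat.mul_add_div hW,
      Nat.div_eq_of_lt (show W - 1 < W by omega), Nat.mul_div_cancel_left q hW]
    omega
  · have hr0 : n % W ≠ 0 := fun hz => hd ((Nat.dvd_iff_mod_eq_zero).mpr hz)
    rw [if_neg hd]
    have hexp : W * (n / W + 1) = W * (n / W) + W := by ring
    rw [show n + W - 1 = W * (n / W + 1) + (n % W - 1) by omega, Nat.mul_add_div hW,
      Nat.div_eq_of_lt (show n % W - 1 < W by omega)]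

lemma pvChunksB (cs : List Char) (W : Nat) (hW : 0 < W) (hcs : cs ≠ []) :
    (PySem.List.pyRange 0 (cs.length : Int) (W : Int)).map
        (fun i => PySem.List.slice cs (some i) (some (i + (W : Int))))
      = (List.range ((cs.length + W - 1) / W)).map (fun i => (cs.drop (i * W)).take W) := by
  have hn : 0 < cs.length := List.length_pos_iff.mpr hcs
  rw [PySem.List.pyRange_of_pos _ _ (by exact_mod_cast hW)]
  have hcond : (0 : Int) < (cs.length : Int) := by exact_mod_cast hn
  rw [if_pos hcond]
  rw [show ((cs.length : Int) - 0 + (W : Int) - 1) = (((cs.length + W - 1 : Nat)) : Int) by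
    omega]
  rw [show (((cs.length + W - 1 : Nat) : Int)) / ((W : Int)) = (((cs.length + W - 1) / W : Nat) : Int) from
    Int.ofNat_ediv_ofNat]
  rw [Int.toNat_natCast]
  rw [List.map_map]
  refine List.map_congr_left fun k hk => ?_
  simp only [Function.comp_apply, zero_add]
  rw [show ((W : Int) * (k : Int)) = (((W * k : Nat)) : Int) by push_cast; ring]
  rw [PySem.List.slice_natCast_add cs (W * k) W]
  rw [Nat.mul_comm]

-- ========== assembly ==========

lemma pv_perWindow (cs : List Char) (W : Nat) (hW : 0 < W) (hcs : cs ≠ []) :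
    ((pvInnerA (W : Int) (cs.length / W)
        (PySem.List.slice cs (some 0) (some (W : Int)))
        (PySem.List.slice cs (some (W : Int)) none) [] 1).length : Int) =
      pvCutTotal (((PySem.List.pyRange 0 (cs.length : Int) (W : Int)).map
        (fun i => PySem.List.slice cs (some i) (some (i + (W : Int)))))) := by
  have hn : 0 < cs.length := List.length_pos_iff.mpr hcs
  have hM1 : 0 < (cs.length + W - 1) / W := by
    have h1 : 1 ≤ (cs.length + W - 1) / W := (Nat.le_div_iff_mul_le hW).mpr (by omega)
    omega
  have hBne : (List.range ((cs.length + W - 1) / W)).map (fun i => (cs.drop (i * W)).take W) ≠ [] := by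
    simp only [ne_eq, List.map_eq_nil_iff, List.range_eq_nil]
    omega
  have hne_elt : ∀ i : Nat, i * W < cs.length → (cs.drop (i * W)).take W ≠ [] := by
    intro i hi hnil
    have hlen : ((cs.drop (i * W)).take W).length = min W (cs.length - i * W) := by
      simp [List.length_take, List.length_drop]
    rw [hnil] at hlen
    simp at hlen
    omega
  have hrle : ∀ (p : List Char) (t : List (List Char)),
      ((pvRleRun p 1 t).length : Int) = pvRleS (p :: t) := by
    intro p t
    rw [pvRleRun_len t p 1 le_rfl]
    simp only [pvRleS]
  have hcons : ∀ K : Nat, (List.range (K + 1)).map (fun i => (cs.drop (i * W)).take W)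
      = cs.take W :: (List.range K).map (fun i => ((cs.drop W).drop (i * W)).take W) := by
    intro K
    rw [List.range_succ_eq_map]
    simp only [List.map_cons, List.map_map, Nat.zero_mul, List.drop_zero]
    refine congrArg (_ :: ·) (List.map_congr_left fun i _ => ?_)
    simp only [Function.comp_apply, List.drop_drop]
    rw [show W + i * W = i.succ * W by simp [Nat.succ_mul]; ring]
  rw [PySem.List.slice_zero_start, PySem.List.slice_to_natCast, PySem.List.slice_from_natCast,
    pvInnerA_eq W, List.nil_append, pvStream_map W, pvChunksB cs W hW hcs,
    pvCutTotal_eq_rleS _ hBne]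
  rw [pvCeilDiv _ _ hW hn]
  by_cases hd : W ∣ cs.length
  · rw [if_pos hd]
    have hK1 : 0 < cs.length / W := by
      rw [pvCeilDiv _ _ hW hn, if_pos hd] at hM1
      exact hM1
    have hKne : (List.range (cs.length / W)).map (fun i => (cs.drop (i * W)).take W) ≠ [] := by
      simp only [ne_eq, List.map_eq_nil_iff, List.range_eq_nil]
      omega
    obtain ⟨c0, rest, hcr⟩ := List.exists_cons_of_ne_nil hKne
    have hnilchunk : (cs.drop ((cs.length / W) * W)).take W = [] := by
      rw [Nat.div_mul_cancel hd]
      simp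
    have hAlist : cs.take W :: (List.range (cs.length / W)).map
        (fun i => ((cs.drop W).drop (i * W)).take W) = c0 :: (rest ++ [[]]) := by
      rw [← hcons, List.range_succ, List.map_append, hcr]
      simp [hnilchunk]
    injection hAlist with h1 h2
    rw [h2, h1]
    have hmemne : ∀ x ∈ c0 :: rest, x ≠ [] := by
      intro x hx
      rw [← hcr] at hx
      obtain ⟨i, hi, rfl⟩ := List.mem_map.mp hx
      have hiK : i < cs.length / W := List.mem_range.mp hi
      refine hne_elt i ?_
      have h1 : (i + 1) * W ≤ (cs.length / W) * W :=
        Nat.mul_le_mul_right W (Nat.succ_le_of_lt hiK)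
      rw [Nat.div_mul_cancel hd] at h1
      have : 0 < W := hW
      calc i * W < (i + 1) * W := by
            have h2m : (i + 1) * W = i * W + W := by ring
            omega
        _ ≤ cs.length := h1
    rw [pvRleRun_trailing_nil _ _ _ (hmemne c0 (by simp)) (fun x hx => hmemne x (by simp [hx]))]
    rw [hrle, hcr]
  · rw [if_neg hd, hcons, hrle]

-- the whole per-window expression of port B equals port A's, for each admitted window


-- ===== VERDICT (by name: the statement is the Claim_ definition above) =====
theorem solution_spec : Claim_equal_solution := by
  unfold Claim_equal_solution
  intro s _hd hpre
  unfold Spec_solution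
  have hne : s.toList ≠ [] := fun h => hpre (String.toList_eq_nil_iff.mp h)
  unfold solution solution_alt
  simp only [PySem.List.len_eq, List.map_id']
  by_cases h1 : s.toList.length = 1
  · simp [h1]
  · have h1' : ¬ s.length = 1 := by rw [String.length_toList] at h1; exact h1
    rw [if_neg (by simp [h1']), if_neg (by simp [h1'])]
    rw [PySem.List.foldl_append_singleton_eq_map]
    simp only [List.nil_append]
    apply congrArg (fun l : List Int => (PySem.List.min? l (fun x => x)).getD 0)
    apply List.map_congr_left
    intro w hw
    obtain ⟨hw1, _⟩ := PySem.List.mem_pyRange_one.mp hw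
    have hW0 : 0 < w.toNat := by omega
    have hwW : ((w.toNat : Nat) : Int) = w := Int.toNat_of_nonneg (by omega)
    rw [← hwW]
    have hchne : (PySem.List.pyRange 0 (s.toList.length : Int) ((w.toNat : Nat) : Int)).map
        (fun i => PySem.List.slice s.toList (some i) (some (i + ((w.toNat : Nat) : Int)))) ≠ [] := by
      rw [pvChunksB s.toList w.toNat hW0 hne]
      simp only [ne_eq, List.map_eq_nil_iff, List.range_eq_nil]
      have hn : 0 < s.toList.length := List.length_pos_iff.mpr hne
      have hge : 1 ≤ (s.toList.length + w.toNat - 1) / w.toNat :=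
        (Nat.le_div_iff_mul_le hW0).mpr (by omega)
      omega
    rw [PySem.Int.floordiv_natCast s.toList.length w.toNat, Int.toNat_natCast]
    rw [pv_perWindow s.toList w.toNat hW0 hne]
    rw [pvPortBody _ hchne]
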